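-- pv_equiv track=rewrite | github.com/hgl71964/rlx | rlx/rlx/rw_engine/agents/one_gnn_ppo.py | _action2v
-- ===== SOURCE A (Python) =====
-- def _action2v(rule_id: int, loc_id: int, locations: list[int]) -> int:
--     cnt = 0
--     for i, num in enumerate(locations):
--         for j in range(num):
--             if i == rule_id and j == loc_id:
--                 return cnt
--             else:
--                 cnt += 1
--
--     assert cnt == sum(
--         locations
--     ), f"Cannot find rule_id {rule_id} and loc_id {loc_id} in {locations} | {cnt} | {sum(locations)}"
--     return cnt
-- ===== SOURCE B (Python) =====
-- def _action2v(rule_id: int, loc_id: int, locations: list[int]) -> int: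
--     if 0 <= rule_id < len(locations) and 0 <= loc_id < locations[rule_id]:
--         return sum(locations[:rule_id]) + loc_id
--     return sum(locations)
-- ===== Notes on version B (the rewrite author's own statement) =====
-- stated objective: simpler
-- what changed: Replaces the nested enumerate/range counting loop by a closed form: a bounds check plus a prefix sum over locations[:rule_id], with sum(locations) as the not-found fallback; Pre_ restricts to nonnegative location counts (the natural domain), since on lists with a negative count A either fails its assert or returns a count that accidentally skips the negative entries.
-- outside the precondition, e.g. on _action2v(1, 0, [-2, 3]): A returns 0, B returns -2
import Mathlib
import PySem

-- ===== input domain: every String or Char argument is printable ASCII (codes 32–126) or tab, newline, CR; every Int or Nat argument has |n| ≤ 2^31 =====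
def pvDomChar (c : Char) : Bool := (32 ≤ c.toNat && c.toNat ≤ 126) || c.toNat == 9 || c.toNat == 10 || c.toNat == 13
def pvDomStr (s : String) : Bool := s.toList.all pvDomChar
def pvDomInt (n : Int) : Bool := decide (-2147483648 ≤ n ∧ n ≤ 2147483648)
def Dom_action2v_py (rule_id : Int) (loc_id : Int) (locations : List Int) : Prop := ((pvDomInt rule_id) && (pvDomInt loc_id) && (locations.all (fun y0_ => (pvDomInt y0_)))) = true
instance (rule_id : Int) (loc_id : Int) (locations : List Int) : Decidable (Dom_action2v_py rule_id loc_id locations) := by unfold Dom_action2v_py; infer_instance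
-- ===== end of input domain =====

-- B replaces A's nested counting loop by a bounds check plus a prefix sum over locations[:rule_id] (a simpler closed form).

-- ===== PORT A =====
-- inner 'for j in range(num)' loop: .inl v = early 'return cnt', .inr cnt = loop finished
def aInner (rule_id loc_id i : Int) (js : List Int) (cnt : Int) : Sum Int Int :=
  match js with
  | [] => .inr cnt
  | j :: rest =>
      if i = rule_id ∧ j = loc_id then .inl cnt
      else aInner rule_id loc_id i rest (cnt + 1)

-- outer 'for i, num in enumerate(locations)' loop
def aOuter (rule_id loc_id : Int) (pairs : List (Int × Int)) (cnt : Int) : Sum Int Int :=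
  match pairs with
  | [] => .inr cnt
  | (i, num) :: rest =>
      match aInner rule_id loc_id i (PySem.List.pyRange 0 num 1) cnt with
      | .inl v => .inl v
      | .inr cnt' => aOuter rule_id loc_id rest cnt'

def action2v_py (rule_id : Int) (loc_id : Int) (locations : List Int) : Int :=
  match aOuter rule_id loc_id (PySem.List.enumerate locations 0) 0 with
  | .inl v => v
  | .inr cnt => cnt
    -- the trailing 'assert cnt == sum(locations)' raises exactly when cnt ≠ sum; those inputs are outside Pre_

-- ===== PORT B =====
def action2v_py_alt (rule_id : Int) (loc_id : Int) (locations : List Int) : Int :=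
  if 0 ≤ rule_id ∧ rule_id < locations.length ∧ 0 ≤ loc_id ∧
      loc_id < PySem.List.pyGetD locations rule_id 0 then
    -- guard ensures 0 ≤ rule_id < len, so pyGetD never hits its default and locations[:rule_id] is a plain take
    (PySem.List.slice locations none (some rule_id)).sum + loc_id
  else
    locations.sum

-- ===== PRECONDITION & SPEC =====
-- Pre_ restricts to the natural domain of nonnegative location counts: on a list with a negative
-- count A either raises its assert (not-found case, cnt ≠ sum) or returns a count that accidentally
-- skips the negative entries (range(num) is empty), which B does not mimic.
def Pre_action2v_py (rule_id : Int) (loc_id : Int) (locations : List Int) : Prop :=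
  ∀ x ∈ locations, 0 ≤ x
instance (rule_id : Int) (loc_id : Int) (locations : List Int) : Decidable (Pre_action2v_py rule_id loc_id locations) := by unfold Pre_action2v_py; infer_instance
def pvWitness_action2v_py : Int × Int × List Int := (1, 0, [2, 3])

def Spec_action2v_py (rule_id : Int) (loc_id : Int) (locations : List Int) (out : Int) : Prop := out = action2v_py_alt rule_id loc_id locations
instance (rule_id : Int) (loc_id : Int) (locations : List Int) (out : Int) : Decidable (Spec_action2v_py rule_id loc_id locations out) := by unfold Spec_action2v_py; infer_instance

-- ===== CLAIM (what is proved, stated in full; the proofs are below) =====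
def Claim_equal_action2v_py : Prop := ∀ (rule_id : Int) (loc_id : Int) (locations : List Int), Dom_action2v_py rule_id loc_id locations → Pre_action2v_py rule_id loc_id locations → Spec_action2v_py rule_id loc_id locations (action2v_py rule_id loc_id locations)

-- ===== LEMMAS AND PROOFS =====

-- the inner loop never fires on xs: it skips past xs, counting its length
theorem aInner_skip (rule_id loc_id i : Int) (xs ys : List Int) (cnt : Int)
    (h : i ≠ rule_id ∨ loc_id ∉ xs) :
    aInner rule_id loc_id i (xs ++ ys) cnt = aInner rule_id loc_id i ys (cnt + xs.length) := by
  induction xs generalizing cnt with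
  | nil => simp
  | cons j rest ih =>
      have hcond : ¬ (i = rule_id ∧ j = loc_id) := by
        rcases h with h | h
        · exact fun hc => h hc.1
        · exact fun hc => h (by simp [hc.2])
      have h' : i ≠ rule_id ∨ loc_id ∉ rest := by
        rcases h with h | h
        · exact .inl h
        · exact .inr (fun hm => h (List.mem_cons_of_mem _ hm))
      rw [List.cons_append]
      simp only [aInner, if_neg hcond, ih _ h']
      congr 1
      simp
      omega

-- the inner loop, run to completion: counts the whole range length
theorem aInner_inr (rule_id loc_id i : Int) (js : List Int) (cnt : Int)
    (h : i ≠ rule_id ∨ loc_id ∉ js) :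
    aInner rule_id loc_id i js cnt = .inr (cnt + js.length) := by
  have := aInner_skip rule_id loc_id i js [] cnt h
  rw [List.append_nil] at this
  rw [this]
  rfl

-- the inner loop fires at j = loc_id
theorem aInner_inl (rule_id loc_id num cnt : Int) (h1 : 0 ≤ loc_id) (h2 : loc_id < num) :
    aInner rule_id loc_id rule_id (PySem.List.pyRange 0 num 1) cnt = .inl (cnt + loc_id) := by
  have hnm : loc_id ∉ PySem.List.pyRange 0 loc_id 1 := by
    rw [PySem.List.mem_pyRange_one]; omega
  rw [PySem.List.pyRange_one_append 0 loc_id num h1 (by omega),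
      aInner_skip rule_id loc_id rule_id _ _ cnt (Or.inr hnm),
      PySem.List.pyRange_one_cons (by omega)]
  simp only [aInner, PySem.List.length_pyRange_one, and_self, if_true, Sum.inl.injEq]
  omega

-- one whole iteration of the outer loop, in closed form
theorem aInner_closed (rule_id loc_id i num cnt : Int) :
    aInner rule_id loc_id i (PySem.List.pyRange 0 num 1) cnt =
      if i = rule_id ∧ 0 ≤ loc_id ∧ loc_id < num then .inl (cnt + loc_id)
      else .inr (cnt + max num 0) := by
  by_cases h : i = rule_id ∧ 0 ≤ loc_id ∧ loc_id < num
  · rw [if_pos h, h.1, aInner_inl rule_id loc_id num cnt h.2.1 h.2.2]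
  · rw [if_neg h, aInner_inr, PySem.List.length_pyRange_one]
    · congr 1
      rw [Int.toNat_eq_max]
      omega
    · by_cases hi : i = rule_id
      · refine .inr ?_
        rw [PySem.List.mem_pyRange_one]
        intro hm
        exact h ⟨hi, by omega, by omega⟩
      · exact .inl hi

-- the outer loop on enumerate locations s, in closed form
theorem aOuter_enum (rule_id loc_id : Int) (locations : List Int) (s cnt : Int) :
    aOuter rule_id loc_id (PySem.List.enumerate locations s) cnt =
      if s ≤ rule_id ∧ rule_id < s + locations.length ∧ 0 ≤ loc_id ∧
          loc_id < (locations.getD (rule_id - s).toNat 0) then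
        .inl (cnt + ((locations.take (rule_id - s).toNat).map (fun x => max x 0)).sum + loc_id)
      else
        .inr (cnt + (locations.map (fun x => max x 0)).sum) := by
  induction locations generalizing s cnt with
  | nil =>
      rw [if_neg (by intro h; simp at h; omega)]
      simp [PySem.List.enumerate, aOuter]
  | cons num rest ih =>
      rw [PySem.List.enumerate_cons]
      by_cases hP : s = rule_id ∧ 0 ≤ loc_id ∧ loc_id < num
      · have hin := aInner_closed rule_id loc_id s num cnt
        rw [if_pos hP] at hin
        simp only [aOuter, hin]
        rw [if_pos (by
          refine ⟨by omega, by simp; omega, hP.2.1, ?_⟩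
          have h0 : (rule_id - s).toNat = 0 := by omega
          rw [h0, List.getD_cons_zero]
          exact hP.2.2)]
        have h0 : (rule_id - s).toNat = 0 := by omega
        rw [h0]
        simp
      · have hin := aInner_closed rule_id loc_id s num cnt
        rw [if_neg hP] at hin
        simp only [aOuter, hin, ih]
        by_cases hQ : s + 1 ≤ rule_id ∧ rule_id < s + 1 + rest.length ∧ 0 ≤ loc_id ∧
            loc_id < rest.getD (rule_id - (s + 1)).toNat 0
        · have ht : (rule_id - s).toNat = (rule_id - (s + 1)).toNat + 1 := by omega
          rw [if_pos hQ, if_pos (by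
            refine ⟨by omega, by simp; omega, hQ.2.2.1, ?_⟩
            rw [ht, List.getD_cons_succ]
            exact hQ.2.2.2)]
          rw [ht, List.take_succ_cons]
          simp
          omega
        · rw [if_neg hQ, if_neg (by
            intro h
            apply hQ
            have hs' : s ≠ rule_id := by
              intro he
              apply hP
              refine ⟨he, h.2.2.1, ?_⟩
              have h0 : (rule_id - s).toNat = 0 := by omega
              rw [h0, List.getD_cons_zero] at h
              exact h.2.2.2
            have ht : (rule_id - s).toNat = (rule_id - (s + 1)).toNat + 1 := by omega
            refine ⟨by omega, by simp at h; omega, h.2.2.1, ?_⟩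
            have := h.2.2.2
            rwa [ht, List.getD_cons_succ] at this)]
          congr 1
          simp
          omega

-- ===== VERDICT (by name: the statement is the Claim_ definition above) =====
theorem action2v_py_spec : Claim_equal_action2v_py := by
  intro rule_id loc_id locations _ hpre
  unfold Spec_action2v_py action2v_py action2v_py_alt
  rw [aOuter_enum]
  have hgd : 0 ≤ rule_id → PySem.List.pyGetD locations rule_id 0 = locations.getD (rule_id - 0).toNat 0 := by
    intro h0
    rw [PySem.List.pyGetD_of_nonneg locations 0 h0]
    norm_num
  have hmap : ∀ l : List Int, (∀ x ∈ l, 0 ≤ x) → (l.map (fun x => max x 0)).sum = l.sum := by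
    intro l hl
    rw [List.map_congr_left (fun x hx => max_eq_left (hl x hx))]
    simp
  by_cases hc : 0 ≤ rule_id ∧ rule_id < locations.length ∧ 0 ≤ loc_id ∧
      loc_id < PySem.List.pyGetD locations rule_id 0
  · rw [if_pos (by rw [hgd hc.1] at hc; exact ⟨hc.1, by simpa using hc.2.1, hc.2.2⟩),
        if_pos hc, PySem.List.slice_to locations hc.1]
    rw [hmap _ (fun x hx => hpre x (List.mem_of_mem_take hx))]
    norm_num
  · rw [if_neg (fun h => hc ⟨by omega, by simpa using h.2.1, h.2.2.1,
          by rw [hgd (by omega)]; simpa using h.2.2.2⟩),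
        if_neg hc]
    rw [hmap _ hpre]
    simp
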